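-- pv_equiv track=rewrite | github.com/SuicideSin/ai | wordladder/weightedpkl.py | isNeighbor
-- ===== SOURCE A (Python) =====
-- def isNeighbor(word, neighbor):
--     if len(word) != len(neighbor):
--         return False
--     diffLetters = 0
--     consec = False
--     for i in range(len(word)):
--         # if diffLetters > 1:
--         #     break
--         if word[i] != neighbor[i]:
--             diffLetters += 1
--         if word[i-1] != neighbor[i-1] and word[i] != neighbor[i]:
--             consec = True
--     if diffLetters == 1:
--         return 1
--     elif diffLetters == 2 and sorted(word) == sorted(neighbor):
--         if consec:
-- 	        return 5
--         else:
--             return -1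
--     else:
--         return -1
-- ===== SOURCE B (Python) =====
-- def isNeighbor(word, neighbor):
--     if len(word) != len(neighbor):
--         return False
--     it = (i for i in range(len(word)) if word[i] != neighbor[i])
--     j = next(it, None)
--     if j is None:
--         return -1
--     k = next(it, None)
--     if k is None:
--         return 1
--     if next(it, None) is None and word[j] == neighbor[k] and word[k] == neighbor[j]:
--         if k - j == 1 or (j == 0 and k == len(word) - 1):
--             return 5
--     return -1
-- ===== Notes on version B (the rewrite author's own statement) =====
-- stated objective: faster
-- what changed: B drops A's full-scan counter/flag loop and the sorted(word)==sorted(neighbor) anagram test: it lazily pulls at most the first three mismatch positions from a generator (early exit) and replaces the sort by a direct swapped-pair character check word[j]==neighbor[k] and word[k]==neighbor[j], classifying adjacency (including the cyclic 0/last pair) from the two indices; O(n) with early exit vs A's sort-based O(n log n).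
-- outside the precondition, e.g. on isNeighbor('abc', 'ab'): A returns False, B returns False
import Mathlib
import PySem

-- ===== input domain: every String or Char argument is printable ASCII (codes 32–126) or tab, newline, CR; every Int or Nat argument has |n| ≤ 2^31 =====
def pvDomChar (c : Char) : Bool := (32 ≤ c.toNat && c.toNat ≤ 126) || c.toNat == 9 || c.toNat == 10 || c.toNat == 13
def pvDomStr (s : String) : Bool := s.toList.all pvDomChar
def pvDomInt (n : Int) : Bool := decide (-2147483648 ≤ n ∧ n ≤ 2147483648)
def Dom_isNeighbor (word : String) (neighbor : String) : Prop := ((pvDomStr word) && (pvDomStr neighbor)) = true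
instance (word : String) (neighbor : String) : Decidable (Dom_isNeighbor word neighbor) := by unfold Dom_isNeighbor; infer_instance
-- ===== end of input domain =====

-- B replaces A's counting loop + sorted() anagram test by a lazy search for the first three
-- mismatch positions (early exit) and a direct swapped-pair check — no sorting at all.

-- ===== PORT A =====
def isNeighbor (word : String) (neighbor : String) : Int :=
  if PySem.Str.len word ≠ PySem.Str.len neighbor then 0   -- Python: `return False` (False == 0)
  else
    let st := (PySem.List.pyRange 0 (PySem.Str.len word) 1).foldl
      (fun (s : Int × Bool) i =>
        let d := if PySem.Str.pyGet? word i ≠ PySem.Str.pyGet? neighbor i then s.1 + 1 else s.1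
        let c := if PySem.Str.pyGet? word (i - 1) ≠ PySem.Str.pyGet? neighbor (i - 1) ∧
                    PySem.Str.pyGet? word i ≠ PySem.Str.pyGet? neighbor i then true else s.2
        (d, c)) (0, false)
    if st.1 = 1 then 1
    else if st.1 = 2 ∧ PySem.List.sorted word.toList (fun c => c) false
                        = PySem.List.sorted neighbor.toList (fun c => c) false then
      if st.2 then 5 else -1
    else -1

-- ===== PORT B =====
-- `next(it, None)` on the generator `(i for i in range(n) if word[i] != neighbor[i])`,
-- resumed from position i: first mismatch index ≥ i, or none.
def pvNextDiff (word neighbor : String) (n i : Int) : Option Int :=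
  if h : i < n then
    if PySem.Str.pyGet? word i ≠ PySem.Str.pyGet? neighbor i then some i
    else pvNextDiff word neighbor n (i + 1)
  else none
termination_by (n - i).toNat
decreasing_by omega

def isNeighbor_alt (word : String) (neighbor : String) : Int :=
  let n := PySem.Str.len word
  if n ≠ PySem.Str.len neighbor then 0   -- Python: `return False` (False == 0)
  else
    match pvNextDiff word neighbor n 0 with
    | none => -1
    | some j =>
      match pvNextDiff word neighbor n (j + 1) with
      | none => 1
      | some k =>
        if pvNextDiff word neighbor n (k + 1) = none ∧
           PySem.Str.pyGet? word j = PySem.Str.pyGet? neighbor k ∧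
           PySem.Str.pyGet? word k = PySem.Str.pyGet? neighbor j then
          if k - j = 1 ∨ (j = 0 ∧ k = n - 1) then 5 else -1
        else -1

-- ===== PRECONDITION & SPEC =====
-- Pre_ excludes length-mismatched pairs, on which Python A (and B) return the bool False,
-- which is not a value of the declared int return type.
def Pre_isNeighbor (word : String) (neighbor : String) : Prop :=
  word.toList.length = neighbor.toList.length
instance (word : String) (neighbor : String) : Decidable (Pre_isNeighbor word neighbor) := by unfold Pre_isNeighbor; infer_instance
def pvWitness_isNeighbor : String × String := ("ab", "ba")
def Spec_isNeighbor (word : String) (neighbor : String) (out : Int) : Prop := out = isNeighbor_alt word neighbor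
instance (word : String) (neighbor : String) (out : Int) : Decidable (Spec_isNeighbor word neighbor out) := by unfold Spec_isNeighbor; infer_instance

-- ===== CLAIM (what is proved, stated in full; the proofs are below) =====
def Claim_equal_isNeighbor : Prop := ∀ (word : String) (neighbor : String), Dom_isNeighbor word neighbor → Pre_isNeighbor word neighbor → Spec_isNeighbor word neighbor (isNeighbor word neighbor)

-- ===== LEMMAS AND PROOFS =====

-- "positions differ" predicate (proof-only shorthand)
def pvP (w v : String) (i : Int) : Bool := decide (PySem.Str.pyGet? w i ≠ PySem.Str.pyGet? v i)
def pvQ (w v : String) (i : Int) : Bool := pvP w v (i - 1) && pvP w v i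

-- A's loop computes (number of mismatches, consec flag = any cyclically-adjacent mismatch pair)
lemma pv_fold (w v : String) (l : List Int) (d : Int) (c : Bool) :
    l.foldl (fun (s : Int × Bool) i =>
        let dd := if PySem.Str.pyGet? w i ≠ PySem.Str.pyGet? v i then s.1 + 1 else s.1
        let cc := if PySem.Str.pyGet? w (i - 1) ≠ PySem.Str.pyGet? v (i - 1) ∧
                    PySem.Str.pyGet? w i ≠ PySem.Str.pyGet? v i then true else s.2
        (dd, cc)) (d, c)
    = (d + ((l.filter (pvP w v)).length : Int), c || l.any (pvQ w v)) := by
  induction l generalizing d c with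
  | nil => simp
  | cons i t ih =>
    simp only [List.foldl_cons, List.filter_cons, List.any_cons]
    rw [ih]
    refine Prod.ext ?_ ?_ <;>
      simp only [pvP, pvQ, PySem.Str.pyGet?_eq, PySem.Chars.pyGet?_eq_listPyGet?]
    · by_cases h1 : PySem.List.pyGet? w.toList i = PySem.List.pyGet? v.toList i
      · simp [h1]
      · simp [h1]; omega
    · by_cases h1 : PySem.List.pyGet? w.toList i = PySem.List.pyGet? v.toList i <;>
        by_cases h2 : PySem.List.pyGet? w.toList (i - 1) = PySem.List.pyGet? v.toList (i - 1) <;>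
        simp [h1, h2]

lemma pvP_neg_one (w v : String) (hw : w.toList.length = v.toList.length)
    (hpos : 0 < w.toList.length) :
    pvP w v (-1) = pvP w v ((w.toList.length : Int) - 1) := by
  unfold pvP
  have h1 : ((w.toList.length : Int) - 1) = ((w.toList.length - 1 : Nat) : Int) := by omega
  rw [h1]
  simp only [PySem.Str.pyGet?_eq, PySem.Chars.pyGet?_eq_listPyGet?,
    PySem.List.pyGet?_neg_one, PySem.List.pyGet?_natCast]
  rw [List.getLast?_eq_getElem?, List.getLast?_eq_getElem?, hw]

-- the consec flag is true iff the two mismatch positions are (cyclically) adjacent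
lemma pv_any_iff (w v : String) (n j k : Int)
    (hn : n = (w.toList.length : Int)) (hw : w.toList.length = v.toList.length)
    (hj : 0 ≤ j) (hjk : j < k) (hk : k < n)
    (hPj : pvP w v j = true) (hPk : pvP w v k = true)
    (huniq : ∀ i, 0 ≤ i → i < n → pvP w v i = true → i = j ∨ i = k) :
    ((PySem.List.pyRange 0 n 1).any (pvQ w v) = true) ↔ (k - j = 1 ∨ (j = 0 ∧ k = n - 1)) := by
  have hpos : 0 < w.toList.length := by omega
  have hneg := pvP_neg_one w v hw hpos
  rw [← hn] at hneg
  constructor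
  · intro h
    obtain ⟨i, hmem, hq⟩ := List.any_eq_true.1 h
    obtain ⟨hi0, hin⟩ := PySem.List.mem_pyRange_one.1 hmem
    simp only [pvQ, Bool.and_eq_true] at hq
    obtain ⟨hqp, hqi⟩ := hq
    rcases huniq i hi0 hin hqi with rfl | rfl
    · by_cases hj0 : i = 0
      · subst hj0
        rw [zero_sub, hneg] at hqp
        rcases huniq (n - 1) (by omega) (by omega) hqp with h' | h'
        · omega
        · exact Or.inr ⟨rfl, h'.symm⟩
      · rcases huniq (i - 1) (by omega) (by omega) hqp with h' | h' <;> omega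
    · rcases huniq (i - 1) (by omega) (by omega) hqp with h' | h' <;> omega
  · rintro (h | ⟨rfl, rfl⟩)
    · refine List.any_eq_true.2 ⟨k, PySem.List.mem_pyRange_one.2 ⟨by omega, hk⟩, ?_⟩
      have hkj : k - 1 = j := by omega
      simp [pvQ, hkj, hPj, hPk]
    · refine List.any_eq_true.2 ⟨0, PySem.List.mem_pyRange_one.2 ⟨le_refl 0, by omega⟩, ?_⟩
      simp only [pvQ, zero_sub, hneg, Bool.and_eq_true]
      exact ⟨hPk, hPj⟩

-- B's lazy mismatch search = head of the filtered range
lemma pvNextDiff_head (w v : String) (n : Int) (k : Nat) :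
    ∀ i : Int, (n - i).toNat = k →
      pvNextDiff w v n i = ((PySem.List.pyRange i n 1).filter (pvP w v)).head? := by
  induction k with
  | zero =>
    intro i h
    have hge : ¬ i < n := by omega
    rw [pvNextDiff, dif_neg hge, PySem.List.pyRange_one_eq_nil (by omega)]
    simp
  | succ k ih =>
    intro i h
    have hlt : i < n := by omega
    rw [pvNextDiff, dif_pos hlt, PySem.List.pyRange_one_cons hlt, List.filter_cons]
    by_cases hp : PySem.Str.pyGet? w i ≠ PySem.Str.pyGet? v i
    · rw [if_pos hp, if_pos (show pvP w v i = true from decide_eq_true hp)]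
      simp
    · rw [if_neg hp]
      have : pvP w v i = false := by simp [pvP]; exact not_not.mp hp
      rw [this]
      simp only [Bool.false_eq_true, if_false]
      exact ih (i + 1) (by omega)

-- dropping the head mismatch: the filtered range restarted past it is the tail
lemma pv_filter_tail (w v : String) (a n j : Int) (rest : List Int)
    (h : (PySem.List.pyRange a n 1).filter (pvP w v) = j :: rest) :
    (PySem.List.pyRange (j + 1) n 1).filter (pvP w v) = rest := by
  have hjmem : j ∈ (PySem.List.pyRange a n 1).filter (pvP w v) := by rw [h]; simp
  obtain ⟨hjr, hPj⟩ := List.mem_filter.1 hjmem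
  obtain ⟨haj, hjn⟩ := PySem.List.mem_pyRange_one.1 hjr
  have hsplit := PySem.List.pyRange_one_append a (j + 1) n (by omega) (by omega)
  rw [hsplit, List.filter_append] at h
  have hjF1 : j ∈ (PySem.List.pyRange a (j + 1) 1).filter (pvP w v) :=
    List.mem_filter.2 ⟨PySem.List.mem_pyRange_one.2 ⟨haj, by omega⟩, hPj⟩
  have hpw : ((PySem.List.pyRange a (j + 1) 1).filter (pvP w v)).Pairwise (· < ·) :=
    (PySem.List.pairwise_lt_pyRange_one a (j + 1)).filter _
  have hsub : ∀ c ∈ (PySem.List.pyRange a (j + 1) 1).filter (pvP w v), c < j + 1 :=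
    fun c hc => (PySem.List.mem_pyRange_one.1 (List.mem_filter.1 hc).1).2
  cases hF : (PySem.List.pyRange a (j + 1) 1).filter (pvP w v) with
  | nil => rw [hF] at hjF1; simp at hjF1
  | cons x t =>
    rw [hF, List.cons_append] at h
    obtain ⟨hx, ht⟩ := List.cons_eq_cons.1 h
    cases ht2 : t with
    | nil => rw [ht2] at ht; simpa using ht
    | cons c t' =>
      exfalso
      rw [hF, ht2] at hpw
      have h1 : x < c := (List.pairwise_cons.1 hpw).1 c (by simp)
      have h2 : c < j + 1 := hsub c (by rw [hF, ht2]; simp)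
      omega

-- two-element permutation with both first components changed: it must be the swap
lemma pv_pair_perm {α : Type} (a b c d : α) (hac : a ≠ c) (hbd : b ≠ d) :
    [a, b].Perm [c, d] ↔ (a = d ∧ b = c) := by
  constructor
  · intro h
    have ha : a ∈ [c, d] := h.mem_iff.1 (by simp)
    have hb : b ∈ [c, d] := h.mem_iff.1 (by simp)
    simp only [List.mem_cons, List.not_mem_nil, or_false] at ha hb
    exact ⟨ha.resolve_left hac, hb.resolve_right hbd⟩
  · rintro ⟨rfl, rfl⟩
    exact List.Perm.swap b a []

-- with exactly two mismatch positions, "anagram" means the two characters are swapped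
lemma pv_perm_iff_swap {α : Type} (w1 w2 w3 : List α) (a b c d : α)
    (hac : a ≠ c) (hbd : b ≠ d) :
    (w1 ++ a :: (w2 ++ b :: w3)).Perm (w1 ++ c :: (w2 ++ d :: w3)) ↔ (a = d ∧ b = c) := by
  rw [List.perm_append_left_iff]
  have h1 : (a :: (w2 ++ b :: w3)).Perm ([a, b] ++ (w2 ++ w3)) := List.perm_middle.cons a
  have h2 : (c :: (w2 ++ d :: w3)).Perm ([c, d] ++ (w2 ++ w3)) := List.perm_middle.cons c
  have key : (a :: (w2 ++ b :: w3)).Perm (c :: (w2 ++ d :: w3)) ↔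
      ([a, b] ++ (w2 ++ w3)).Perm ([c, d] ++ (w2 ++ w3)) :=
    ⟨fun h => (h1.symm.trans h).trans h2, fun h => (h1.trans h).trans h2.symm⟩
  rw [key, List.perm_append_right_iff]
  exact pv_pair_perm a b c d hac hbd

-- splitting a list at two indices
lemma pv_decomp {α : Type} (W : List α) (jn kn : Nat) (hjk : jn < kn) (hk : kn < W.length) :
    W = W.take jn ++ W[jn] ::
        (((W.drop (jn + 1)).take (kn - jn - 1)) ++ W[kn] :: W.drop (kn + 1)) := by
  conv_lhs => rw [← List.take_append_drop jn W]
  congr 1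
  rw [List.drop_eq_getElem_cons (show jn < W.length by omega)]
  congr 1
  conv_lhs => rw [← List.take_append_drop (kn - jn - 1) (W.drop (jn + 1))]
  congr 1
  rw [List.drop_drop]
  have h : jn + 1 + (kn - jn - 1) = kn := by omega
  rw [h, List.drop_eq_getElem_cons hk]

lemma pv_seg_take {α : Type} (W V : List α) (m : Nat)
    (hEq : ∀ i, i < m → W[i]? = V[i]?) : W.take m = V.take m := by
  apply List.ext_getElem?
  intro i
  rw [List.getElem?_take, List.getElem?_take]
  split_ifs with h
  · exact hEq i h
  · rfl

lemma pv_seg_drop {α : Type} (W V : List α) (m : Nat)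
    (hEq : ∀ i, m ≤ i → W[i]? = V[i]?) : W.drop m = V.drop m := by
  apply List.ext_getElem?
  intro i
  rw [List.getElem?_drop, List.getElem?_drop]
  exact hEq (m + i) (by omega)

-- ===== VERDICT (by name: the statement is the Claim_ definition above) =====
theorem isNeighbor_spec : Claim_equal_isNeighbor := by
  intro word neighbor _ hpre
  unfold Spec_isNeighbor
  have hlen : PySem.Str.len word = PySem.Str.len neighbor := by
    rw [PySem.Str.len_eq, PySem.Str.len_eq]; exact_mod_cast hpre
  simp only [isNeighbor, isNeighbor_alt]
  rw [if_neg (not_not_intro hlen), if_neg (not_not_intro hlen)]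
  rw [pv_fold]
  simp only [zero_add, Bool.false_or]
  have hnw : PySem.Str.len word = (word.toList.length : Int) := PySem.Str.len_eq word
  obtain ⟨L, hL⟩ : ∃ L',
      (PySem.List.pyRange 0 (PySem.Str.len word) 1).filter (pvP word neighbor) = L' := ⟨_, rfl⟩
  have hhead0 : pvNextDiff word neighbor (PySem.Str.len word) 0 = L.head? := by
    rw [pvNextDiff_head word neighbor _ _ 0 rfl, hL]
  rw [hL, hhead0]
  cases L with
  | nil => norm_num
  | cons j rest =>
    have htail1 := pv_filter_tail word neighbor 0 (PySem.Str.len word) j rest hL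
    have hhead1 : pvNextDiff word neighbor (PySem.Str.len word) (j + 1) = rest.head? := by
      rw [pvNextDiff_head word neighbor _ _ (j + 1) rfl, htail1]
    simp only [List.head?_cons]
    rw [hhead1]
    cases rest with
    | nil => norm_num
    | cons k rest2 =>
      have htail2 := pv_filter_tail word neighbor (j + 1) (PySem.Str.len word) k rest2 htail1
      have hhead2 : pvNextDiff word neighbor (PySem.Str.len word) (k + 1) = rest2.head? := by
        rw [pvNextDiff_head word neighbor _ _ (k + 1) rfl, htail2]
      simp only [List.head?_cons]
      rw [hhead2]
      cases rest2 with
      | cons r rs =>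
        simp only [List.head?_cons]
        rw [if_neg (show ¬ (((j :: k :: r :: rs).length : Int) = 1) by
            simp only [List.length_cons]; push_cast; omega),
          if_neg (fun hh => by
            have h := hh.1; simp only [List.length_cons] at h; push_cast at h; omega),
          if_neg (fun hh => by simpa using hh.1)]
      | nil =>
        -- exactly two mismatch positions j < k
        have hjmem : j ∈ (PySem.List.pyRange 0 (PySem.Str.len word) 1).filter
            (pvP word neighbor) := by rw [hL]; simp
        have hkmem : k ∈ (PySem.List.pyRange 0 (PySem.Str.len word) 1).filter
            (pvP word neighbor) := by rw [hL]; simp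
        obtain ⟨hjr, hPj⟩ := List.mem_filter.1 hjmem
        obtain ⟨hkr, hPk⟩ := List.mem_filter.1 hkmem
        obtain ⟨hj0, hjn⟩ := PySem.List.mem_pyRange_one.1 hjr
        obtain ⟨hk0, hkn⟩ := PySem.List.mem_pyRange_one.1 hkr
        have hjk : j < k := by
          have hp := (PySem.List.pairwise_lt_pyRange_one 0 (PySem.Str.len word)).filter
            (pvP word neighbor)
          rw [hL] at hp
          simpa using hp
        have huniq : ∀ i, 0 ≤ i → i < PySem.Str.len word →
            pvP word neighbor i = true → i = j ∨ i = k := by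
          intro i hi0 hin hP
          have hiL : i ∈ (PySem.List.pyRange 0 (PySem.Str.len word) 1).filter
              (pvP word neighbor) :=
            List.mem_filter.2 ⟨PySem.List.mem_pyRange_one.2 ⟨hi0, hin⟩, hP⟩
          rw [hL] at hiL
          simpa using hiL
        have hj' : j = ((j.toNat : Nat) : Int) := (Int.toNat_of_nonneg hj0).symm
        have hk' : k = ((k.toNat : Nat) : Int) := (Int.toNat_of_nonneg hk0).symm
        have hlen' : word.toList.length = neighbor.toList.length := hpre
        have hjnW : j.toNat < word.toList.length := by omega
        have hknW : k.toNat < word.toList.length := by omega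
        have hjnV : j.toNat < neighbor.toList.length := by omega
        have hknV : k.toNat < neighbor.toList.length := by omega
        have hjnkn : j.toNat < k.toNat := by omega
        have hgj : PySem.Str.pyGet? word j = some (word.toList[j.toNat]'hjnW) := by
          have h1 : PySem.Str.pyGet? word j
              = PySem.Str.pyGet? word ((j.toNat : Nat) : Int) := by rw [← hj']
          rw [h1, PySem.Str.pyGet?_natCast]
          exact List.getElem?_eq_getElem hjnW
        have hgk : PySem.Str.pyGet? word k = some (word.toList[k.toNat]'hknW) := by
          have h1 : PySem.Str.pyGet? word k
              = PySem.Str.pyGet? word ((k.toNat : Nat) : Int) := by rw [← hk']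
          rw [h1, PySem.Str.pyGet?_natCast]
          exact List.getElem?_eq_getElem hknW
        have hgj' : PySem.Str.pyGet? neighbor j = some (neighbor.toList[j.toNat]'hjnV) := by
          have h1 : PySem.Str.pyGet? neighbor j
              = PySem.Str.pyGet? neighbor ((j.toNat : Nat) : Int) := by rw [← hj']
          rw [h1, PySem.Str.pyGet?_natCast]
          exact List.getElem?_eq_getElem hjnV
        have hgk' : PySem.Str.pyGet? neighbor k = some (neighbor.toList[k.toNat]'hknV) := by
          have h1 : PySem.Str.pyGet? neighbor k
              = PySem.Str.pyGet? neighbor ((k.toNat : Nat) : Int) := by rw [← hk']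
          rw [h1, PySem.Str.pyGet?_natCast]
          exact List.getElem?_eq_getElem hknV
        have hac : (word.toList[j.toNat]'hjnW) ≠ (neighbor.toList[j.toNat]'hjnV) := by
          have h := of_decide_eq_true hPj
          rw [hgj, hgj'] at h
          simpa using h
        have hbd : (word.toList[k.toNat]'hknW) ≠ (neighbor.toList[k.toNat]'hknV) := by
          have h := of_decide_eq_true hPk
          rw [hgk, hgk'] at h
          simpa using h
        -- all other positions agree
        have hEq : ∀ i : Nat, i ≠ j.toNat → i ≠ k.toNat →
            word.toList[i]? = neighbor.toList[i]? := by
          intro i hij hik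
          by_cases hi : (i : Int) < PySem.Str.len word
          · have hP : ¬ pvP word neighbor (i : Int) = true := by
              intro hP
              rcases huniq (i : Int) (by omega) hi hP with h' | h' <;> omega
            have h : PySem.Str.pyGet? word (i : Int) = PySem.Str.pyGet? neighbor (i : Int) := by
              by_contra hne
              exact hP (decide_eq_true hne)
            rw [PySem.Str.pyGet?_natCast, PySem.Str.pyGet?_natCast] at h
            exact h
          · rw [List.getElem?_eq_none (by omega), List.getElem?_eq_none (by omega)]
        have hTake : word.toList.take j.toNat = neighbor.toList.take j.toNat :=
          pv_seg_take _ _ _ (fun i hi => hEq i (by omega) (by omega))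
        have hMid : (word.toList.drop (j.toNat + 1)).take (k.toNat - j.toNat - 1)
            = (neighbor.toList.drop (j.toNat + 1)).take (k.toNat - j.toNat - 1) := by
          apply pv_seg_take
          intro i hi
          rw [List.getElem?_drop, List.getElem?_drop]
          exact hEq (j.toNat + 1 + i) (by omega) (by omega)
        have hDrop : word.toList.drop (k.toNat + 1) = neighbor.toList.drop (k.toNat + 1) :=
          pv_seg_drop _ _ _ (fun i hi => hEq i (by omega) (by omega))
        have hWdec := pv_decomp word.toList j.toNat k.toNat hjnkn hknW
        have hVdec := pv_decomp neighbor.toList j.toNat k.toNat hjnkn hknV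
        rw [← hTake, ← hMid, ← hDrop] at hVdec
        have hPermIff : word.toList.Perm neighbor.toList ↔
            ((word.toList[j.toNat]'hjnW) = (neighbor.toList[k.toNat]'hknV) ∧
             (word.toList[k.toNat]'hknW) = (neighbor.toList[j.toNat]'hjnV)) := by
          have h := pv_perm_iff_swap (word.toList.take j.toNat)
            ((word.toList.drop (j.toNat + 1)).take (k.toNat - j.toNat - 1))
            (word.toList.drop (k.toNat + 1))
            (word.toList[j.toNat]'hjnW) (word.toList[k.toNat]'hknW)
            (neighbor.toList[j.toNat]'hjnV) (neighbor.toList[k.toNat]'hknV) hac hbd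
          rw [← hWdec, ← hVdec] at h
          exact h
        have hBcond : (PySem.Str.pyGet? word j = PySem.Str.pyGet? neighbor k ∧
            PySem.Str.pyGet? word k = PySem.Str.pyGet? neighbor j) ↔
            ((word.toList[j.toNat]'hjnW) = (neighbor.toList[k.toNat]'hknV) ∧
             (word.toList[k.toNat]'hknW) = (neighbor.toList[j.toNat]'hjnV)) := by
          rw [hgj, hgk, hgj', hgk']
          simp
        have hAdjIff := pv_any_iff word neighbor (PySem.Str.len word) j k hnw hpre
          hj0 hjk hkn hPj hPk huniq
        by_cases hs : (word.toList[j.toNat]'hjnW) = (neighbor.toList[k.toNat]'hknV) ∧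
            (word.toList[k.toNat]'hknW) = (neighbor.toList[j.toNat]'hjnV)
        · have hsort : PySem.List.sorted word.toList (fun c => c) false
              = PySem.List.sorted neighbor.toList (fun c => c) false :=
            (PySem.List.sorted_id_eq_sorted_id_iff_perm word.toList neighbor.toList).2 (hPermIff.2 hs)
          have hA2 : (([j, k].length : Int) = 2) ∧
              PySem.List.sorted word.toList (fun c => c) false
                = PySem.List.sorted neighbor.toList (fun c => c) false := ⟨by norm_num, hsort⟩
          have hBc : ([] : List Int).head? = none ∧
              (PySem.Str.pyGet? word j = PySem.Str.pyGet? neighbor k ∧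
               PySem.Str.pyGet? word k = PySem.Str.pyGet? neighbor j) := ⟨rfl, hBcond.2 hs⟩
          rw [if_neg (by norm_num), if_pos hA2, if_pos hBc]
          by_cases hadj : k - j = 1 ∨ (j = 0 ∧ k = PySem.Str.len word - 1)
          · rw [if_pos (hAdjIff.2 hadj), if_pos hadj]
          · rw [if_neg (fun hh => hadj (hAdjIff.1 hh)), if_neg hadj]
        · have hnsort : ¬ (PySem.List.sorted word.toList (fun c => c) false
              = PySem.List.sorted neighbor.toList (fun c => c) false) := fun hh =>
            hs (hPermIff.1 ((PySem.List.sorted_id_eq_sorted_id_iff_perm word.toList neighbor.toList).1 hh))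
          rw [if_neg (by norm_num), if_neg (fun hh => hnsort hh.2),
            if_neg (fun hh => hs (hBcond.1 hh.2))]
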